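-- pv_equiv track=rewrite | github.com/Explik/au-2025-chinese-course-a1 | extract_chinese_from_pdfs.py | extract_combinations
-- ===== SOURCE A (Python) =====
-- def extract_combinations(text):
--     combinations = set()
--     length = len(text)
--
--     for i in range(length):
--         for j in range(i + 1, length + 1):
--             combinations.add(text[i:j])
--
--     combinations.remove(text)
--
--     sorted_combinations = sorted(combinations, key=lambda x: (len(x), text.index(x)))
--
--     return list(sorted_combinations)
-- ===== SOURCE B (Python) =====
-- def extract_combinations(text):
--     n = len(text)
--     seen = set()
--     result = []
--     for length in range(1, n):
--         for i in range(n - length + 1):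
--             s = text[i:i + length]
--             if s not in seen:
--                 seen.add(s)
--                 result.append(s)
--     return result
-- ===== Notes on version B (the rewrite author's own statement) =====
-- stated objective: faster
-- what changed: B drops A's build-set-then-comparison-sort (whose key calls text.index per substring) and instead emits distinct substrings directly in length-major, first-occurrence order via a single deduplicating scan, so no sort and no index scans are needed.
import Mathlib
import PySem

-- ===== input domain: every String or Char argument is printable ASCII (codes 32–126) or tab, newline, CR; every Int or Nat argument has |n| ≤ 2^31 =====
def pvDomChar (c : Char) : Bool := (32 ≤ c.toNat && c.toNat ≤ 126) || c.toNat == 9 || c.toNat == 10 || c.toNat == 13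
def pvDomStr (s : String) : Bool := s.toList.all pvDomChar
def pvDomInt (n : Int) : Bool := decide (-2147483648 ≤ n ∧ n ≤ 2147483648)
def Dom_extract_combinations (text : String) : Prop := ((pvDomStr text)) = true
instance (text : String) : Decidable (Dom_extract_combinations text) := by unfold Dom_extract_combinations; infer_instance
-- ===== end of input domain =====

-- B replaces A's build-set-then-sort (with text.index in the sort key) by a length-major
-- deduplicating scan that emits each distinct proper substring at its first occurrence, so the
-- output comes out already ordered with no sort (objective: faster, measured).

-- ===== PORT A =====
-- works on text.toList (PySem string functions are defined on List Char);
-- Python's text.index(x) is ported as PySem.Chars.find (exact here: x is always a substring of text)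
def extract_combinations (text : String) : List String :=
  let t := text.toList
  let length : Int := PySem.Str.len text
  let combinations : PySem.Set (List Char) :=
    (PySem.List.pyRange 0 length).foldl (fun s i =>
      (PySem.List.pyRange (i + 1) (length + 1)).foldl (fun s j =>
        PySem.Set.add s (PySem.List.slice t (some i) (some j))) s) PySem.Set.empty
  match PySem.Set.remove? combinations t with
  | none => []  -- Python raises KeyError here (only for text = ""); excluded by Pre_
  | some rest =>
      (PySem.List.sorted2 rest (fun x => PySem.Chars.len x) (fun x => PySem.Chars.find t x)).map
        String.ofList

-- ===== PORT B =====
def extract_combinations_alt (text : String) : List String :=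
  let t := text.toList
  let n : Int := PySem.Str.len text
  let res :=
    (PySem.List.pyRange 1 n).foldl
      (fun (acc : PySem.Set (List Char) × List (List Char)) L =>
        (PySem.List.pyRange 0 (n - L + 1)).foldl
          (fun acc i =>
            if PySem.Set.contains acc.1 (PySem.List.slice t (some i) (some (i + L))) then acc
            else (PySem.Set.add acc.1 (PySem.List.slice t (some i) (some (i + L))),
              acc.2 ++ [PySem.List.slice t (some i) (some (i + L))]))
          acc)
      (PySem.Set.empty, [])
  res.2.map String.ofList

-- ===== PRECONDITION & SPEC =====
-- Pre_ excludes only the empty string, on which A's `combinations.remove(text)` raises KeyError.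
def Pre_extract_combinations (text : String) : Prop := text ≠ ""
instance (text : String) : Decidable (Pre_extract_combinations text) := by
  unfold Pre_extract_combinations; infer_instance
def pvWitness_extract_combinations : String := "ab"

def Spec_extract_combinations (text : String) (out : List String) : Prop :=
  out = extract_combinations_alt text
instance (text : String) (out : List String) : Decidable (Spec_extract_combinations text out) := by
  unfold Spec_extract_combinations; infer_instance

-- ===== CLAIM (what is proved, stated in full; the proofs are below) =====
def Claim_equal_extract_combinations : Prop :=
  ∀ (text : String), Dom_extract_combinations text → Pre_extract_combinations text →
    Spec_extract_combinations text (extract_combinations text)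

-- ===== LEMMAS AND PROOFS =====

/-- proof-side view of the Python slice text[i:i+L] with natural bounds -/
def subCL (t : List Char) (i L : Nat) : List Char := (t.drop i).take L
/-- all slices of length L, start index ascending -/
def blkCL (t : List Char) (L : Nat) : List (List Char) :=
  (List.range (t.length - L + 1)).map (fun i => subCL t i L)
/-- the slices A generates, in A's generation order -/
def genA (t : List Char) : List (List Char) :=
  (List.range t.length).flatMap (fun i =>
    (List.range (t.length - i)).map (fun d => subCL t i (d + 1)))
/-- the slices B generates, in B's generation order -/
def genB (t : List Char) : List (List Char) :=
  (List.range (t.length - 1)).flatMap (fun k => blkCL t (k + 1))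
/-- A's sort key, as one lexicographic key -/
def keyL (t x : List Char) : Lex (Int × Int) := toLex (PySem.Chars.len x, PySem.Chars.find t x)

theorem length_subCL (t : List Char) (i L : Nat) (h : i + L ≤ t.length) :
    (subCL t i L).length = L := by
  simp [subCL]; omega

theorem mem_genA (t : List Char) (x : List Char) :
    x ∈ genA t ↔ ∃ i L, 0 < L ∧ i + L ≤ t.length ∧ x = subCL t i L := by
  simp only [genA, List.mem_flatMap, List.mem_map, List.mem_range]
  constructor
  · rintro ⟨i, hi, d, hd, rfl⟩; exact ⟨i, d+1, by omega, by omega, rfl⟩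
  · rintro ⟨i, L, hL, hiL, rfl⟩; exact ⟨i, by omega, L-1, by omega, by congr 1; omega⟩

theorem mem_genB (t : List Char) (x : List Char) :
    x ∈ genB t ↔ ∃ i L, 0 < L ∧ L < t.length ∧ i + L ≤ t.length ∧ x = subCL t i L := by
  simp only [genB, blkCL, List.mem_flatMap, List.mem_map, List.mem_range]
  constructor
  · rintro ⟨k, hk, i, hi, rfl⟩; exact ⟨i, k+1, by omega, by omega, by omega, rfl⟩
  · rintro ⟨i, L, hL, hLn, hiL, rfl⟩; exact ⟨L-1, by omega, i, by omega, by congr 1; omega⟩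

theorem subCL_prefix (t : List Char) (i L : Nat) : subCL t i L <+: t.drop i := List.take_prefix _ _

theorem subCL_infix (t : List Char) (i L : Nat) : subCL t i L <:+: t :=
  ((subCL_prefix t i L).isInfix).trans (t.drop_suffix i).isInfix

theorem find_spec (t x : List Char) (hne : PySem.Chars.find t x ≠ -1) :
    0 ≤ PySem.Chars.find t x ∧ x <+: t.drop (PySem.Chars.find t x).toNat ∧
      ∀ j : Nat, j < (PySem.Chars.find t x).toNat → ¬ x <+: t.drop j := by
  have h := PySem.Chars.findFrom_natCast_spec t x 0 (by omega)
  rw [Nat.cast_zero, PySem.Chars.findFrom_zero] at h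
  obtain ⟨h1, h2, h3⟩ := h hne
  exact ⟨h1, h2, fun j hj => h3 j (by omega) hj⟩

theorem find_subCL_bounds (t : List Char) (i L : Nat) :
    0 ≤ PySem.Chars.find t (subCL t i L) ∧ PySem.Chars.find t (subCL t i L) ≤ (i : Int) := by
  have hne : PySem.Chars.find t (subCL t i L) ≠ -1 :=
    fun hc => ((PySem.Chars.find_eq_neg_one_iff t _).mp hc) (subCL_infix t i L)
  obtain ⟨h0, _, hmin⟩ := find_spec t _ hne
  refine ⟨h0, ?_⟩
  by_contra hc
  exact hmin i (by omega) (subCL_prefix t i L)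

theorem find_subCL_eq (t : List Char) (m L : Nat) (hm : m + L ≤ t.length)
    (h : ∀ i < m, subCL t i L ≠ subCL t m L) :
    PySem.Chars.find t (subCL t m L) = (m : Int) := by
  have hne : PySem.Chars.find t (subCL t m L) ≠ -1 :=
    fun hc => ((PySem.Chars.find_eq_neg_one_iff t _).mp hc) (subCL_infix t m L)
  obtain ⟨h0, hpre, hmin⟩ := find_spec t _ hne
  obtain ⟨_, hle⟩ := find_subCL_bounds t m L
  set f := (PySem.Chars.find t (subCL t m L)).toNat with hf
  have hfm : f ≤ m := by omega
  rcases Nat.lt_or_ge f m with hlt | _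
  · have hlen : (subCL t m L).length = L := length_subCL t m L hm
    have : subCL t f L = subCL t m L := by
      have := List.prefix_iff_eq_take.mp hpre
      rw [hlen] at this
      exact this.symm
    exact absurd this (h f hlt)
  · omega

theorem foldl_add_shift {α : Type} [BEq α] [LawfulBEq α] (l : List α) (s t : List α)
    (h : ∀ y ∈ l, y ∉ s) :
    List.foldl PySem.Set.add (s ++ t) l = s ++ List.foldl PySem.Set.add t l := by
  induction l generalizing t with
  | nil => rfl
  | cons y l ih =>
    have hy : y ∉ s := h y (by simp)
    have hstep : PySem.Set.add (s ++ t) y = s ++ PySem.Set.add t y := by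
      simp [PySem.Set.add, PySem.Set.contains, hy]
      by_cases ht : y ∈ t <;> simp [ht]
    rw [List.foldl_cons, List.foldl_cons, hstep, ih _ (fun z hz => h z (by simp [hz]))]

theorem ofList_append_disjoint {α : Type} [BEq α] [LawfulBEq α] (l1 l2 : List α)
    (h : ∀ y ∈ l2, y ∉ l1) :
    PySem.Set.ofList (l1 ++ l2) = PySem.Set.ofList l1 ++ PySem.Set.ofList l2 := by
  rw [PySem.Set.ofList_eq_foldl, PySem.Set.ofList_eq_foldl, PySem.Set.ofList_eq_foldl,
    List.foldl_append]
  have h1 : List.foldl PySem.Set.add [] l1 = PySem.Set.ofList l1 := (PySem.Set.ofList_eq_foldl l1).symm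
  rw [h1]
  have h2 := foldl_add_shift l2 (PySem.Set.ofList l1) []
    (fun y hy => by rw [PySem.Set.mem_ofList]; exact h y hy)
  simpa [← PySem.Set.ofList_eq_foldl] using h2

theorem ofList_append_singleton {α : Type} [BEq α] [LawfulBEq α] (l : List α) (x : α) :
    PySem.Set.ofList (l ++ [x]) =
      if x ∈ l then PySem.Set.ofList l else PySem.Set.ofList l ++ [x] := by
  rw [PySem.Set.ofList_eq_foldl, List.foldl_append, ← PySem.Set.ofList_eq_foldl]
  simp [PySem.Set.add, PySem.Set.contains, PySem.Set.mem_ofList]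

theorem mem_blk (t : List Char) (L : Nat) (hLn : L ≤ t.length) (x : List Char) :
    x ∈ blkCL t L ↔ ∃ i, i + L ≤ t.length ∧ x = subCL t i L := by
  simp only [blkCL, List.mem_map, List.mem_range]
  constructor
  · rintro ⟨i, hi, rfl⟩; exact ⟨i, by omega, rfl⟩
  · rintro ⟨i, hi, rfl⟩; exact ⟨i, by omega, rfl⟩

theorem mem_ofList_blk_len (t : List Char) (L : Nat) (hLn : L ≤ t.length) (x : List Char)
    (hx : x ∈ PySem.Set.ofList (blkCL t L)) : x.length = L := by
  rw [PySem.Set.mem_ofList, mem_blk t L hLn] at hx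
  obtain ⟨i, hi, rfl⟩ := hx
  exact length_subCL t i L hi

theorem blk_pairwise_aux (t : List Char) (L : Nat) (m : Nat) (hm : m + L ≤ t.length + 1) :
    (PySem.Set.ofList ((List.range m).map (fun i => subCL t i L))).Pairwise
      (fun a b => PySem.Chars.find t a < PySem.Chars.find t b) := by
  induction m with
  | zero => simp [PySem.Set.ofList]
  | succ m ih =>
    rw [List.range_succ, List.map_append, List.map_singleton, ofList_append_singleton]
    split_ifs with hmem
    · exact ih (by omega)
    · rw [List.pairwise_append]
      refine ⟨ih (by omega), by simp, ?_⟩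
      intro a ha b hb
      simp at hb; subst hb
      rw [PySem.Set.mem_ofList] at ha
      simp only [List.mem_map, List.mem_range] at ha
      obtain ⟨i, hi, rfl⟩ := ha
      have hfb : PySem.Chars.find t (subCL t m L) = (m : Int) := by
        refine find_subCL_eq t m L (by omega) ?_
        intro j hj hc
        exact hmem (by rw [← hc]; exact List.mem_map_of_mem (List.mem_range.mpr hj))
      have := find_subCL_bounds t i L
      rw [hfb]; omega

theorem blk_pairwise (t : List Char) (L : Nat) (hLn : L ≤ t.length) :
    (PySem.Set.ofList (blkCL t L)).Pairwise
      (fun a b => PySem.Chars.find t a < PySem.Chars.find t b) := by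
  have := blk_pairwise_aux t L (t.length - L + 1) (by omega)
  simpa [blkCL] using this

theorem ofList_genB_flat_aux (t : List Char) (m : Nat) (hm : m ≤ t.length - 1) :
    PySem.Set.ofList ((List.range m).flatMap (fun k => blkCL t (k + 1))) =
      (List.range m).flatMap (fun k => PySem.Set.ofList (blkCL t (k + 1))) := by
  induction m with
  | zero => simp [PySem.Set.ofList]
  | succ m ih =>
    rw [List.range_succ, List.flatMap_append, List.flatMap_singleton,
      List.flatMap_append, List.flatMap_singleton, ← ih (by omega)]
    refine ofList_append_disjoint _ _ ?_
    intro y hy hc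
    have hylen : y.length = m + 1 := by
      rw [mem_blk t (m+1) (by omega)] at hy
      obtain ⟨i, hi, rfl⟩ := hy
      exact length_subCL t i (m+1) hi
    simp only [List.mem_flatMap, List.mem_range] at hc
    obtain ⟨k, hk, hky⟩ := hc
    have : y.length = k + 1 := by
      rw [mem_blk t (k+1) (by omega)] at hky
      obtain ⟨i, hi, rfl⟩ := hky
      exact length_subCL t i (k+1) hi
    omega

theorem genB_pairwise (t : List Char) :
    (PySem.Set.ofList (genB t)).Pairwise (fun a b => keyL t a < keyL t b) := by
  rw [genB, ofList_genB_flat_aux t (t.length - 1) (by omega)]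
  rw [List.pairwise_flatMap]
  constructor
  · intro k hk
    simp only [List.mem_range] at hk
    refine ((blk_pairwise t (k+1) (by omega)).imp_of_mem ?_)
    intro a b ha hb hfind
    have hla := mem_ofList_blk_len t (k+1) (by omega) a ha
    have hlb := mem_ofList_blk_len t (k+1) (by omega) b hb
    rw [keyL, keyL, Prod.Lex.lt_iff]
    right
    exact ⟨by simp [PySem.Chars.len, hla, hlb], hfind⟩
  · refine (List.pairwise_lt_range).imp_of_mem ?_
    intro k1 k2 h1 h2 hlt x hx y hy
    simp only [List.mem_range] at h1 h2
    have hx' := mem_ofList_blk_len t (k1+1) (by omega) x hx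
    have hy' := mem_ofList_blk_len t (k2+1) (by omega) y hy
    rw [keyL, keyL, Prod.Lex.lt_iff]
    left
    simp [PySem.Chars.len, hx', hy']
    exact_mod_cast hlt

theorem genB_perm (t : List Char) (h : t ≠ []) :
    (PySem.Set.ofList (genB t)).Perm
      (PySem.Set.discard (PySem.Set.ofList (genA t)) t) := by
  have hn : 0 < t.length := List.length_pos_iff.mpr h
  have nd1 : (PySem.Set.ofList (genB t)).Nodup := PySem.Set.nodup_ofList _
  have nd2 : (PySem.Set.discard (PySem.Set.ofList (genA t)) t).Nodup :=
    (PySem.Set.nodup_ofList _).filter _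
  rw [List.perm_ext_iff_of_nodup nd1 nd2]
  intro x
  have hd : x ∈ PySem.Set.discard (PySem.Set.ofList (genA t)) t ↔
      x ∈ PySem.Set.ofList (genA t) ∧ x ≠ t := by
    simp [PySem.Set.discard, List.mem_filter]
  rw [hd, PySem.Set.mem_ofList, PySem.Set.mem_ofList, mem_genA, mem_genB]
  constructor
  · rintro ⟨i, L, hL, hLn, hiL, rfl⟩
    refine ⟨⟨i, L, hL, hiL, rfl⟩, ?_⟩
    intro hc
    have := congrArg List.length hc
    rw [length_subCL t i L hiL] at this
    omega
  · rintro ⟨⟨i, L, hL, hiL, rfl⟩, hne⟩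
    refine ⟨i, L, hL, ?_, hiL, rfl⟩
    rcases Nat.lt_or_ge L t.length with h' | h'
    · exact h'
    · exfalso
      apply hne
      have hi0 : i = 0 := by omega
      have hLn : L = t.length := by omega
      subst hi0; subst hLn
      simp [subCL]

theorem pyRange_one_n (n : Nat) :
    PySem.List.pyRange 1 (n : Int) = (List.range (n - 1)).map (fun k => ((k + 1 : Nat) : Int)) := by
  rw [PySem.List.pyRange_of_pos _ _ (by norm_num : (0:Int) < 1)]
  have h1 : (if (1:Int) < (n:Int) then (((n:Int) - 1 + 1 - 1) / 1).toNat else 0) = n - 1 := by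
    split_ifs with h <;> omega
  rw [h1]
  apply List.map_congr_left
  intro k _
  push_cast; ring

theorem pyRange_succ_cast (i n : Nat) (h : i < n) :
    PySem.List.pyRange ((i:Int)+1) ((n:Int)+1)
      = (List.range (n - i)).map (fun d => ((i+1+d : Nat) : Int)) := by
  rw [PySem.List.pyRange_of_pos _ _ (by norm_num : (0:Int) < 1)]
  have hc : (if (i:Int)+1 < (n:Int)+1 then (((n:Int)+1 - ((i:Int)+1) + 1 - 1)/1).toNat else 0)
      = n - i := by split_ifs with hh <;> omega
  rw [hc]
  apply List.map_congr_left
  intro d _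
  push_cast; ring

theorem slice_sub (t : List Char) (i d : Nat) :
    PySem.List.slice t (some (i:Int)) (some ((i+1+d : Nat):Int)) = subCL t i (d+1) := by
  have h : ((i+1+d:Nat):Int) = (i:Int) + ((d+1:Nat):Int) := by push_cast; ring
  rw [h, PySem.List.slice_natCast_add, subCL]

theorem sorted2_eq_sorted_lex {α : Type} (xs : List α) (k1 k2 : α → Int) :
    PySem.List.sorted2 xs k1 k2 = PySem.List.sorted xs (fun x => toLex (k1 x, k2 x)) := by
  rw [PySem.List.sorted_eq_foldl_insertBy]
  simp only [PySem.List.sorted2]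
  congr 1
  funext acc x
  congr 1
  funext a b
  have hlex : (toLex (k1 a, k2 a) < toLex (k1 b, k2 b)) ↔
      (k1 a < k1 b ∨ (k1 a = k1 b ∧ k2 a < k2 b)) := Prod.Lex.lt_iff
  by_cases h1 : k1 a < k1 b <;> by_cases h2 : k1 b < k1 a <;> by_cases h3 : k2 a < k2 b <;>
    simp [h1, h2, h3, hlex] <;> omega

theorem pairfold (l : List (List Char)) (x : PySem.Set (List Char)) :
    l.foldl
      (fun (acc : PySem.Set (List Char) × List (List Char)) s =>
        if PySem.Set.contains acc.1 s then acc
        else (PySem.Set.add acc.1 s, acc.2 ++ [s]))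
      (x, x) = (l.foldl PySem.Set.add x, l.foldl PySem.Set.add x) := by
  induction l generalizing x with
  | nil => rfl
  | cons s l ih =>
    simp only [List.foldl_cons]
    by_cases h : s ∈ x
    · have ha : PySem.Set.add x s = x := by simp [PySem.Set.add, PySem.Set.contains, h]
      simpa [h, ha] using ih x
    · have ha : PySem.Set.add x s = x ++ [s] := by simp [PySem.Set.add, PySem.Set.contains, h]
      simpa [h, ha] using ih (x ++ [s])

theorem portA_eq (text : String) (h : text.toList ≠ []) :
    extract_combinations text =
      (PySem.List.sorted
        (PySem.Set.discard (PySem.Set.ofList (genA text.toList)) text.toList)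
        (keyL text.toList)).map String.ofList := by
  unfold extract_combinations
  simp only [PySem.Str.len]
  rw [PySem.List.pyRange_zero_natCast, List.foldl_map]
  have hinner : ∀ (s : PySem.Set (List Char)), ∀ i ∈ List.range text.toList.length,
      List.foldl (fun s j => PySem.Set.add s (PySem.List.slice text.toList (some ((i:Nat):Int)) (some j)))
        s (PySem.List.pyRange (((i:Nat):Int) + 1) ((text.toList.length:Int) + 1))
      = List.foldl PySem.Set.add s
          ((List.range (text.toList.length - i)).map (fun d => subCL text.toList i (d+1))) := by
    intro s i hi
    simp only [List.mem_range] at hi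
    rw [pyRange_succ_cast i _ hi, List.foldl_map, List.foldl_map]
    apply PySem.List.foldl_congr_mem
    intro acc d _
    rw [slice_sub]
  have h1 := PySem.List.foldl_congr_mem (List.range text.toList.length) _ _
    (PySem.Set.empty : PySem.Set (List Char)) hinner
  rw [h1]
  rw [show (PySem.Set.empty : PySem.Set (List Char)) = ([] : List (List Char)) from rfl]
  rw [← List.foldl_flatMap]
  rw [show ((List.range text.toList.length).flatMap
      (fun i => (List.range (text.toList.length - i)).map (fun d => subCL text.toList i (d+1))))
      = genA text.toList from rfl]
  rw [← PySem.Set.ofList_eq_foldl]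
  have hn : 0 < text.toList.length := List.length_pos_iff.mpr h
  have hmem : text.toList ∈ PySem.Set.ofList (genA text.toList) := by
    rw [PySem.Set.mem_ofList]
    simp only [genA, List.mem_flatMap, List.mem_map, List.mem_range]
    refine ⟨0, by omega, text.toList.length - 1, by omega, ?_⟩
    simp [subCL]
    omega
  have hrem : PySem.Set.remove? (PySem.Set.ofList (genA text.toList)) text.toList
      = some (PySem.Set.discard (PySem.Set.ofList (genA text.toList)) text.toList) := by
    simp [PySem.Set.remove?, PySem.Set.contains, hmem]
  rw [hrem]
  show (PySem.List.sorted2 ((PySem.Set.ofList (genA text.toList)).discard text.toList)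
      (fun x => PySem.Chars.len x) (fun x => PySem.Chars.find text.toList x)).map String.ofList = _
  rw [sorted2_eq_sorted_lex]
  rfl

theorem portB_eq (text : String) :
    extract_combinations_alt text = (PySem.Set.ofList (genB text.toList)).map String.ofList := by
  unfold extract_combinations_alt
  simp only [PySem.Str.len]
  rw [pyRange_one_n, List.foldl_map]
  have hinner : ∀ (acc : PySem.Set (List Char) × List (List Char)),
      ∀ k ∈ List.range (text.toList.length - 1),
      (PySem.List.pyRange 0 ((text.toList.length : Int) - ((k+1:Nat) : Int) + 1)).foldl
          (fun acc i =>
            if PySem.Set.contains acc.1 (PySem.List.slice text.toList (some i) (some (i + ((k+1:Nat):Int)))) then acc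
            else (PySem.Set.add acc.1 (PySem.List.slice text.toList (some i) (some (i + ((k+1:Nat):Int)))),
              acc.2 ++ [PySem.List.slice text.toList (some i) (some (i + ((k+1:Nat):Int)))])) acc
        = (blkCL text.toList (k+1)).foldl
            (fun acc s => if PySem.Set.contains acc.1 s then acc
              else (PySem.Set.add acc.1 s, acc.2 ++ [s])) acc := by
    intro acc k hk
    simp only [List.mem_range] at hk
    have harg : ((text.toList.length : Int) - ((k+1:Nat) : Int) + 1)
        = ((text.toList.length - (k+1) + 1 : Nat) : Int) := by push_cast; omega
    rw [harg, PySem.List.pyRange_zero_natCast, List.foldl_map]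
    rw [blkCL, List.foldl_map]
    apply PySem.List.foldl_congr_mem
    intro acc' i _
    simp only [PySem.List.slice_natCast_add, subCL]
  have h1 := PySem.List.foldl_congr_mem (List.range (text.toList.length - 1)) _ _
    ((PySem.Set.empty : PySem.Set (List Char)), ([] : List (List Char))) hinner
  rw [h1]
  rw [show (PySem.Set.empty : PySem.Set (List Char)) = ([] : List (List Char)) from rfl]
  rw [← List.foldl_flatMap]
  rw [show ((List.range (text.toList.length - 1)).flatMap (fun k => blkCL text.toList (k+1)))
      = genB text.toList from rfl]
  rw [pairfold]
  rw [PySem.Set.ofList_eq_foldl]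

-- ===== VERDICT (by name: the statement is the Claim_ definition above) =====
theorem extract_combinations_spec : Claim_equal_extract_combinations := by
  intro text _ hpre
  have ht : text.toList ≠ [] := by
    intro hc
    have h2 := String.ofList_toList (s := text)
    rw [hc] at h2
    exact hpre h2.symm
  unfold Spec_extract_combinations
  rw [portA_eq text ht, portB_eq text]
  rw [PySem.List.sorted_eq_of_perm_of_pairwise_lt _ _ _ (genB_perm text.toList ht)
    (genB_pairwise text.toList)]
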